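-- pv_equiv track=rewrite | github.com/siva3io/Eunimart_ai_keywords | app/services/keywords/keywords_generator.py | Extracting_Adjectives_FollowedBy_Noun
-- ===== SOURCE A (Python) =====
-- def Extracting_Adjectives_FollowedBy_Noun(current_iterator, pos_words_list: list):
--     iterate_upto_length_lessthan_2 = 0
--     extracted_keyphrase = pos_words_list[current_iterator+1][0]
--     adjective_combo_noun_keyphrase = pos_words_list[current_iterator][0]+' '
--     for loop_iterator in range(current_iterator+1, len(pos_words_list)):
--         if pos_words_list[loop_iterator][0]==extracted_keyphrase and iterate_upto_length_lessthan_2<2: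
--             adjective_combo_noun_keyphrase+=pos_words_list[loop_iterator][0]+' '
--             iterate_upto_length_lessthan_2+=1
--         else: break
--     return adjective_combo_noun_keyphrase, iterate_upto_length_lessthan_2
-- ===== SOURCE B (Python) =====
-- def Extracting_Adjectives_FollowedBy_Noun(current_iterator, pos_words_list: list):
--     first = pos_words_list[current_iterator][0]
--     target = pos_words_list[current_iterator + 1][0]
--     count = 1
--     if current_iterator + 2 < len(pos_words_list) and pos_words_list[current_iterator + 2][0] == target:
--         count = 2
--     return first + ' ' + (target + ' ') * count, count
-- ===== Notes on version B (the rewrite author's own statement) =====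
-- stated objective: simpler
-- what changed: The incremental for-loop with a break and a running counter is replaced by a loop-free closed form: the cap-2 run length is computed by one guarded comparison of the element after next, and the phrase is assembled by string repetition.
import Mathlib
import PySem

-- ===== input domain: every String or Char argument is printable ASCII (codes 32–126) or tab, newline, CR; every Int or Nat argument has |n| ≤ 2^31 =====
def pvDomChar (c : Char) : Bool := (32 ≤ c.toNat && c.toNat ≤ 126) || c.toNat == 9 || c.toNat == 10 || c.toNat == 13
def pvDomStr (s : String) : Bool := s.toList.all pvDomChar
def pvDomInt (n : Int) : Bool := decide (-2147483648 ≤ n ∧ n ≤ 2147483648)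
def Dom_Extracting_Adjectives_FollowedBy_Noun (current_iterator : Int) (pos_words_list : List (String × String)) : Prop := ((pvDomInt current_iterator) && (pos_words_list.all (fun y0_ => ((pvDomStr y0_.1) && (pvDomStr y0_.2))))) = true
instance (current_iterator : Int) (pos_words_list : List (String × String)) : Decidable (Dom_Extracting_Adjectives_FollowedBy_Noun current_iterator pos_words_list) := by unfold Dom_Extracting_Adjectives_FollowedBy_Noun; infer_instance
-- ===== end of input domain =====

-- B replaces A's break-loop with a loop-free closed form (one guarded comparison for the
-- cap-2 run length, string repetition for the phrase); objective: simpler.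

-- ===== PORT A =====
-- A's for-loop with break, transcribed as structural recursion over the range list.
def pvALoop (l : List (String × String)) (extracted : String) :
    List Int → String → Int → String × Int
  | [], phrase, cnt => (phrase, cnt)
  | i :: rest, phrase, cnt =>
    let w := ((PySem.List.pyGet? l i).getD ("", "")).1
    if w = extracted ∧ cnt < 2 then
      pvALoop l extracted rest (phrase ++ w ++ " ") (cnt + 1)
    else (phrase, cnt)

def Extracting_Adjectives_FollowedBy_Noun (current_iterator : Int) (pos_words_list : List (String × String)) : String × Int :=
  let extracted := ((PySem.List.pyGet? pos_words_list (current_iterator + 1)).getD ("", "")).1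
  let phrase := ((PySem.List.pyGet? pos_words_list current_iterator).getD ("", "")).1 ++ " "
  pvALoop pos_words_list extracted
    (PySem.List.pyRange (current_iterator + 1) (pos_words_list.length : Int) 1) phrase 0

-- ===== PORT B =====
-- Python's  s * n  on strings
def pvStrMul (s : String) (n : Int) : String := String.join (List.replicate n.toNat s)

def Extracting_Adjectives_FollowedBy_Noun_alt (current_iterator : Int) (pos_words_list : List (String × String)) : String × Int :=
  let first := ((PySem.List.pyGet? pos_words_list current_iterator).getD ("", "")).1
  let target := ((PySem.List.pyGet? pos_words_list (current_iterator + 1)).getD ("", "")).1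
  let count : Int :=
    if current_iterator + 2 < (pos_words_list.length : Int) ∧
        ((PySem.List.pyGet? pos_words_list (current_iterator + 2)).getD ("", "")).1 = target
    then 2 else 1
  (first ++ " " ++ pvStrMul (target ++ " ") count, count)

-- ===== PRECONDITION & SPEC =====
-- Pre_ excludes exactly the inputs where Python raises IndexError: both programs index
-- pos_words_list[current_iterator] and [current_iterator+1] unconditionally.
def Pre_Extracting_Adjectives_FollowedBy_Noun (current_iterator : Int) (pos_words_list : List (String × String)) : Prop :=
  -(pos_words_list.length : Int) ≤ current_iterator ∧ current_iterator + 1 < (pos_words_list.length : Int)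
instance (current_iterator : Int) (pos_words_list : List (String × String)) : Decidable (Pre_Extracting_Adjectives_FollowedBy_Noun current_iterator pos_words_list) := by unfold Pre_Extracting_Adjectives_FollowedBy_Noun; infer_instance

def pvWitness_Extracting_Adjectives_FollowedBy_Noun : Int × (List (String × String)) :=
  (0, [("big", "JJ"), ("big", "JJ"), ("dog", "NN")])

def Spec_Extracting_Adjectives_FollowedBy_Noun (current_iterator : Int) (pos_words_list : List (String × String)) (out : String × Int) : Prop := out = Extracting_Adjectives_FollowedBy_Noun_alt current_iterator pos_words_list
instance (current_iterator : Int) (pos_words_list : List (String × String)) (out : String × Int) : Decidable (Spec_Extracting_Adjectives_FollowedBy_Noun current_iterator pos_words_list out) := by unfold Spec_Extracting_Adjectives_FollowedBy_Noun; infer_instance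

-- ===== CLAIM (what is proved, stated in full; the proofs are below) =====
def Claim_equal_Extracting_Adjectives_FollowedBy_Noun : Prop := ∀ (current_iterator : Int) (pos_words_list : List (String × String)), Dom_Extracting_Adjectives_FollowedBy_Noun current_iterator pos_words_list → Pre_Extracting_Adjectives_FollowedBy_Noun current_iterator pos_words_list → Spec_Extracting_Adjectives_FollowedBy_Noun current_iterator pos_words_list (Extracting_Adjectives_FollowedBy_Noun current_iterator pos_words_list)

-- ===== LEMMAS AND PROOFS =====
-- once the counter reaches 2 the loop returns immediately, whatever range remains
theorem pvALoop_two (l : List (String × String)) (e : String) (r : List Int) (phrase : String) :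
    pvALoop l e r phrase 2 = (phrase, 2) := by
  cases r <;> simp [pvALoop]

-- ===== VERDICT (by name: the statement is the Claim_ definition above) =====
theorem Extracting_Adjectives_FollowedBy_Noun_spec : Claim_equal_Extracting_Adjectives_FollowedBy_Noun := by
  intro ci l _ hpre
  obtain ⟨_, h2⟩ := hpre
  unfold Spec_Extracting_Adjectives_FollowedBy_Noun
  unfold Extracting_Adjectives_FollowedBy_Noun Extracting_Adjectives_FollowedBy_Noun_alt
  rw [PySem.List.pyRange_one_cons h2]
  simp only [pvALoop]
  by_cases hc : ci + 1 + 1 < (l.length : Int)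
  · rw [PySem.List.pyRange_one_cons hc]
    simp only [pvALoop]
    by_cases he : ((PySem.List.pyGet? l (ci + 1 + 1)).getD ("", "")).1
        = ((PySem.List.pyGet? l (ci + 1)).getD ("", "")).1
    · have hc2 : ci + 2 < (l.length : Int) := by omega
      have he2 : ((PySem.List.pyGet? l (ci + 2)).getD ("", "")).1
          = ((PySem.List.pyGet? l (ci + 1)).getD ("", "")).1 := by
        rw [show ci + 2 = ci + 1 + 1 by ring]; exact he
      simp [he, hc2, he2, pvALoop_two, pvStrMul, String.join, String.append_assoc]
    · have : ¬ (ci + 2 < (l.length : Int) ∧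
          ((PySem.List.pyGet? l (ci + 2)).getD ("", "")).1
            = ((PySem.List.pyGet? l (ci + 1)).getD ("", "")).1) := by
        rw [show ci + 2 = ci + 1 + 1 by ring]; tauto
      simp [he, this, pvStrMul, String.join, String.append_assoc]
  · rw [PySem.List.pyRange_one_eq_nil (by omega)]
    have : ¬ (ci + 2 < (l.length : Int) ∧
        ((PySem.List.pyGet? l (ci + 2)).getD ("", "")).1
          = ((PySem.List.pyGet? l (ci + 1)).getD ("", "")).1) := by
      intro h; exact hc (by omega)
    simp [pvALoop, this, pvStrMul, String.join, String.append_assoc]
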